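-- pv_equiv track=rewrite | github.com/tue-mdse/conferenceMetrics | tools/python/metrics.py | __computeCore
-- ===== SOURCE A (Python) =====
-- def __computeCore(yearsPerName):
--     """Compute core persons (authors, PC members = frequent flyers)"""
--     corePeople = {}
--     """Core people stretch up to five years in the past, given a certain edition of the conference.
--     Conditions for authors:
--     - (co)authored papers in at least 3 out of the 5 most recent editions, or
--     - (co)authored papers in at least 2 out the the 3 most recent editions
--     Analogously for PC members
--     => I can only compute core people starting with the third edition of the conference."""
--     years = set()
--     for name in yearsPerName.keys():
--         years.update(yearsPerName[name])
--     years = sorted(years, key = lambda year: -year) # descending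
--     # at least 2 out the the 3 most recent editions
--     for idx1, year in enumerate(years[:-2]):
--         idx2 = idx1 + 3
--         for name in yearsPerName.keys():
--             if len(yearsPerName[name].intersection(set(years[idx1:idx2]))) >= 2:
--                 try:
--                     corePeople[year].add(name)
--                 except:
--                     corePeople[year] = set()
--                     corePeople[year].add(name)
--     # at least 3 out of the 5 most recent editions
--     for idx1, year in enumerate(years[:-4]):
--         idx2 = idx1 + 5
--         for name in yearsPerName.keys():
--             if len(yearsPerName[name].intersection(set(years[idx1:idx2]))) >= 3:
--                 try:
--                     corePeople[year].add(name)
--                 except: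
--                     corePeople[year] = set()
--                     corePeople[year].add(name)
--
--     return corePeople
-- ===== SOURCE B (Python) =====
-- def __computeCore(yearsPerName):
--     """Compute core persons via a per-name prefix-count index over the sorted year axis."""
--     corePeople = {}
--     years = set()
--     for ys in yearsPerName.values():
--         years |= ys
--     years = sorted(years, key=lambda year: -year)  # descending
--     n = len(years)
--     # prefix-count index: counts[name][j] = how many of name's years lie among years[0:j]
--     counts = {}
--     for name, ys in yearsPerName.items():
--         row = [0]
--         c = 0
--         for y in years:
--             if y in ys:
--                 c += 1
--             row.append(c)
--         counts[name] = row
--     # at least 2 of the 3 most recent editions: window [idx, idx+3)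
--     for idx in range(n - 2):
--         for name, row in counts.items():
--             if row[idx + 3] - row[idx] >= 2:
--                 corePeople.setdefault(years[idx], set()).add(name)
--     # at least 3 of the 5 most recent editions: window [idx, idx+5)
--     for idx in range(n - 4):
--         for name, row in counts.items():
--             if row[idx + 5] - row[idx] >= 3:
--                 corePeople.setdefault(years[idx], set()).add(name)
--     return corePeople
-- ===== Notes on version B (the rewrite author's own statement) =====
-- stated objective: faster
-- what changed: Instead of materialising a window set and intersecting it with every name's year-set for every (year, name) pair, B builds one per-name prefix-count array over the descending year axis and decides each window membership test with a single prefix difference.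
import Mathlib
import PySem

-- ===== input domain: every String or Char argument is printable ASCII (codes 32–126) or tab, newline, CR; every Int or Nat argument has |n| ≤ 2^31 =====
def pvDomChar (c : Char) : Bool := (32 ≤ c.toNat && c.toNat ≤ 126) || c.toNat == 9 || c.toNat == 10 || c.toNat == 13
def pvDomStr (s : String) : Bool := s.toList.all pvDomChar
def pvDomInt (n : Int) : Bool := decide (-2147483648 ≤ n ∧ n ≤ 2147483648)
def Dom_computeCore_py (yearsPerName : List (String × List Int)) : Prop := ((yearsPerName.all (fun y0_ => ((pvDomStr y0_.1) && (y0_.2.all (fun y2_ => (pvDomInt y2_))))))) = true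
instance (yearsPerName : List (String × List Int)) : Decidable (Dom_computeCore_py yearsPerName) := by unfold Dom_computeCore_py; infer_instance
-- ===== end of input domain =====

-- B replaces the per-(year,name) window-set intersections by one per-name prefix-count array
-- over the descending year axis (objective: faster; asymptotically fewer set operations).

-- ===== PORT A =====
-- call-boundary conversion shared by both ports: the dict[str, set[int]] argument arrives as an
-- association list; Python dict construction (later duplicate key wins, first position kept)
-- and set(...) dedup (first occurrences).
def pvToDict (yearsPerName : List (String × List Int)) : PySem.Dict String (PySem.Set Int) :=
  yearsPerName.foldl (fun d p => d.insert p.1 (PySem.Set.ofList p.2)) PySem.Dict.empty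

def computeCore_py (yearsPerName : List (String × List Int)) : List (Int × List String) :=
  let ypn := pvToDict yearsPerName
  -- years = set(); for name in yearsPerName.keys(): years.update(yearsPerName[name])
  -- (yearsPerName[name] never raises here: name comes from keys(); getD's default is unreachable)
  let years0 : PySem.Set Int :=
    ypn.keys.foldl (fun s name => PySem.Set.update s (ypn.getD name PySem.Set.empty)) PySem.Set.empty
  -- years = sorted(years, key = lambda year: -year)
  let years : List Int := PySem.List.sorted years0 (fun year => -year) false
  -- at least 2 out of the 3 most recent editions
  let core1 : PySem.Dict Int (PySem.Set String) :=
    (PySem.List.enumerate (PySem.List.slice years none (some (-2)))).foldl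
      (fun cp iy =>
        let idx1 := iy.1
        let year := iy.2
        let idx2 := idx1 + 3
        ypn.keys.foldl
          (fun cp name =>
            if 2 ≤ (PySem.Set.inter (ypn.getD name PySem.Set.empty)
                      (PySem.Set.ofList (PySem.List.slice years (some idx1) (some idx2)))).length then
              match cp.get? year with
              | some s => cp.insert year (PySem.Set.add s name)       -- corePeople[year].add(name)
              | none   => (cp.insert year PySem.Set.empty).insert year
                            (PySem.Set.add PySem.Set.empty name)      -- except: corePeople[year] = set(); …add(name)
            else cp) cp)
      PySem.Dict.empty
  -- at least 3 out of the 5 most recent editions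
  let core2 : PySem.Dict Int (PySem.Set String) :=
    (PySem.List.enumerate (PySem.List.slice years none (some (-4)))).foldl
      (fun cp iy =>
        let idx1 := iy.1
        let year := iy.2
        let idx2 := idx1 + 5
        ypn.keys.foldl
          (fun cp name =>
            if 3 ≤ (PySem.Set.inter (ypn.getD name PySem.Set.empty)
                      (PySem.Set.ofList (PySem.List.slice years (some idx1) (some idx2)))).length then
              match cp.get? year with
              | some s => cp.insert year (PySem.Set.add s name)
              | none   => (cp.insert year PySem.Set.empty).insert year
                            (PySem.Set.add PySem.Set.empty name)
            else cp) cp)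
      core1
  core2.items

-- ===== PORT B =====
-- row = [0]; c = 0; for y in years: (if y in ys: c += 1); row.append(c)
def pvRow (ys : PySem.Set Int) (years : List Int) : List Int :=
  (years.foldl
    (fun rc y =>
      let c := if PySem.Set.contains ys y then rc.2 + 1 else rc.2
      (rc.1 ++ [c], c))
    (([(0 : Int)] : List Int), (0 : Int))).1

def computeCore_py_alt (yearsPerName : List (String × List Int)) : List (Int × List String) :=
  let ypn := pvToDict yearsPerName
  -- years = set(); for ys in yearsPerName.values(): years |= ys
  let years0 : PySem.Set Int :=
    ypn.values.foldl (fun s ys => PySem.Set.union s ys) PySem.Set.empty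
  let years : List Int := PySem.List.sorted years0 (fun year => -year) false
  let n : Int := (years.length : Int)
  -- counts[name] = prefix-count row of that name's years along the sorted axis
  let counts : PySem.Dict String (List Int) :=
    ypn.items.foldl (fun d p => d.insert p.1 (pvRow p.2 years)) PySem.Dict.empty
  -- window [idx, idx+3): core when at least 2 hits  (indices always in range: idx + 3 ≤ n)
  let core1 : PySem.Dict Int (PySem.Set String) :=
    (PySem.List.pyRange 0 (n - 2)).foldl
      (fun cp idx =>
        counts.items.foldl
          (fun cp nr =>
            if (2 : Int) ≤ PySem.List.pyGetD nr.2 (idx + 3) 0 - PySem.List.pyGetD nr.2 idx 0 then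
              PySem.Dict.modify cp (PySem.List.pyGetD years idx 0) PySem.Set.empty
                (fun s => PySem.Set.add s nr.1)   -- corePeople.setdefault(years[idx], set()).add(name)
            else cp) cp)
      PySem.Dict.empty
  -- window [idx, idx+5): core when at least 3 hits
  let core2 : PySem.Dict Int (PySem.Set String) :=
    (PySem.List.pyRange 0 (n - 4)).foldl
      (fun cp idx =>
        counts.items.foldl
          (fun cp nr =>
            if (3 : Int) ≤ PySem.List.pyGetD nr.2 (idx + 5) 0 - PySem.List.pyGetD nr.2 idx 0 then
              PySem.Dict.modify cp (PySem.List.pyGetD years idx 0) PySem.Set.empty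
                (fun s => PySem.Set.add s nr.1)
            else cp) cp)
      core1
  core2.items

-- ===== PRECONDITION & SPEC =====
def Spec_computeCore_py (yearsPerName : List (String × List Int)) (out : List (Int × List String)) : Prop := out = computeCore_py_alt yearsPerName
instance (yearsPerName : List (String × List Int)) (out : List (Int × List String)) : Decidable (Spec_computeCore_py yearsPerName out) := by unfold Spec_computeCore_py; infer_instance

-- ===== CLAIM (what is proved, stated in full; the proofs are below) =====
def Claim_equal_computeCore_py : Prop := ∀ (yearsPerName : List (String × List Int)), Dom_computeCore_py yearsPerName → Spec_computeCore_py yearsPerName (computeCore_py yearsPerName)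

-- ===== LEMMAS AND PROOFS =====

theorem pvToDict_keys_nodup (L : List (String × List Int)) : (pvToDict L).keys.Nodup := by
  unfold pvToDict
  exact PySem.Dict.nodup_keys_foldl_insert_key L Prod.fst _ _ (by simp)

theorem pvToDict_values_nodup (L : List (String × List Int)) :
    ∀ p ∈ (pvToDict L).items, (p.2 : List Int).Nodup := by
  unfold pvToDict
  suffices h : ∀ (d : PySem.Dict String (PySem.Set Int)), (∀ p ∈ d.items, (p.2 : List Int).Nodup) →
      ∀ p ∈ (L.foldl (fun d p => d.insert p.1 (PySem.Set.ofList p.2)) d).items, (p.2 : List Int).Nodup by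
    exact h _ (by simp [PySem.Dict.empty])
  induction L with
  | nil => intro d hd; simpa using hd
  | cons q t ih =>
    intro d hd
    simp only [List.foldl_cons]
    refine ih _ ?_
    intro p hp
    rcases (PySem.Dict.mem_items_insert _ _ _ _).1 hp with h | h
    · subst h; exact PySem.Set.nodup_ofList _
    · exact hd _ h.1

-- the brains of the re-implementation: pvRow is the running prefix count
theorem pvRow_aux (p : Int → Bool) (l : List Int) : ∀ (acc : List Int) (c : Int),
    l.foldl
      (fun rc y =>
        let c := if p y then rc.2 + 1 else rc.2
        (rc.1 ++ [c], c)) (acc, c)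
    = (acc ++ (List.range l.length).map
          (fun j => c + (((l.take (j+1)).countP p : Nat) : Int)),
       c + ((l.countP p : Nat) : Int)) := by
  induction l with
  | nil => intro acc c; simp
  | cons y tl ih =>
    intro acc c
    have hc' : (if p y then c + 1 else c) = c + (([y].countP p : Nat) : Int) := by
      by_cases h : p y = true
      · rw [if_pos h]; rw [List.countP_cons, List.countP_nil]; simp [h]
      · rw [if_neg h]; rw [List.countP_cons, List.countP_nil]; simp [h]
    simp only [List.foldl_cons, ih]
    rw [Prod.mk.injEq]
    refine ⟨?_, ?_⟩
    · simp only [List.length_cons]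
      rw [List.range_succ_eq_map]
      simp only [List.map_cons, List.map_map]
      rw [List.append_assoc, List.singleton_append]
      congr 1
      rw [List.cons.injEq]
      refine ⟨?_, ?_⟩
      · rw [hc']
        simp
      · congr 1
        funext j
        simp only [Function.comp_apply, List.take_succ_cons, List.countP_cons]
        by_cases h : p y = true
        · simp [h]; ring
        · simp [h]
    · rw [List.countP_cons, hc', List.countP_cons, List.countP_nil]
      by_cases h : p y = true
      · simp [h]; ring
      · simp [h]

theorem pvRow_getD (ys : PySem.Set Int) (years : List Int) (j : Nat) (hj : j ≤ years.length) :
    (pvRow ys years).getD j 0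
      = (((years.take j).countP (fun y => PySem.Set.contains ys y) : Nat) : Int) := by
  unfold pvRow
  rw [pvRow_aux (fun y => PySem.Set.contains ys y)]
  cases j with
  | zero => simp
  | succ i =>
    have hi : i < years.length := by omega
    simp only [List.cons_append, List.getD]
    rw [List.getElem?_cons_succ]
    simp [hi]

-- counting a Nodup intersection from either side
theorem pvCountSwap (xs ws : List Int) (hx : xs.Nodup) (hw : ws.Nodup) :
    xs.countP (fun y => decide (y ∈ ws)) = ws.countP (fun y => decide (y ∈ xs)) := by
  rw [List.countP_eq_length_filter, List.countP_eq_length_filter]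
  refine List.Perm.length_eq ?_
  rw [List.perm_ext_iff_of_nodup (List.Nodup.filter _ hx) (List.Nodup.filter _ hw)]
  intro a
  simp only [List.mem_filter, decide_eq_true_eq]
  tauto
theorem pvRange_sub_natCast (len cut : Nat) :
    PySem.List.pyRange 0 ((len : Int) - (cut : Int)) = PySem.List.pyRange 0 ((len - cut : Nat) : Int) := by
  rcases Nat.lt_or_ge len cut with h | h
  swap
  · congr 1; omega
  · have h1 : (len : Int) - (cut : Int) < 0 := by omega
    have h2 : len - cut = 0 := by omega
    rw [h2]
    simp only [PySem.List.pyRange]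
    norm_num
    omega

-- the body of both inner updates is the same dict operation
theorem pvBody_eq (cp : PySem.Dict Int (PySem.Set String)) (year : Int) (name : String) :
    (match cp.get? year with
      | some s => cp.insert year (PySem.Set.add s name)
      | none   => (cp.insert year PySem.Set.empty).insert year (PySem.Set.add PySem.Set.empty name))
    = PySem.Dict.modify cp year PySem.Set.empty (fun s => PySem.Set.add s name) := by
  cases h : cp.get? year with
  | some s =>
    simp only [PySem.Dict.modify, PySem.Dict.getD_of_get?_eq_some _ _ h]
  | none =>
    simp only [PySem.Dict.modify, PySem.Dict.getD_of_get?_eq_none _ _ h,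
      PySem.Dict.insert_insert_self]

-- one pass of the year loop: A's enumerate/slice/intersection pass equals B's pyRange/prefix-difference pass
theorem pvPass_eq (L : List (String × List Int)) (years : List Int) (hN : years.Nodup)
    (cut wsz thr : Nat) (hw : wsz = cut + 1) (hcut : 0 < cut)
    (negCut w t bnd : Int) (hnc : negCut = -(cut : Int)) (hwz : w = (wsz : Int))
    (ht : t = (thr : Int)) (hbnd : bnd = (years.length : Int) - (cut : Int))
    (cp : PySem.Dict Int (PySem.Set String)) :
    (PySem.List.enumerate (PySem.List.slice years none (some negCut))).foldl
      (fun cp iy =>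
        (pvToDict L).keys.foldl
          (fun cp name =>
            if thr ≤ (PySem.Set.inter ((pvToDict L).getD name PySem.Set.empty)
                      (PySem.Set.ofList (PySem.List.slice years (some iy.1) (some (iy.1 + w))))).length then
              match cp.get? iy.2 with
              | some s => cp.insert iy.2 (PySem.Set.add s name)
              | none   => (cp.insert iy.2 PySem.Set.empty).insert iy.2
                            (PySem.Set.add PySem.Set.empty name)
            else cp) cp) cp
    = (PySem.List.pyRange 0 bnd).foldl
      (fun cp idx =>
        ((pvToDict L).items.map (fun p => (p.1, pvRow p.2 years))).foldl
          (fun cp nr =>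
            if t ≤ PySem.List.pyGetD nr.2 (idx + w) 0 - PySem.List.pyGetD nr.2 idx 0 then
              PySem.Dict.modify cp (PySem.List.pyGetD years idx 0) PySem.Set.empty
                (fun s => PySem.Set.add s nr.1)
            else cp) cp) cp := by
  subst hnc hwz ht hbnd
  have hm : years.length - cut ≤ years.length := Nat.sub_le _ _
  rw [PySem.List.slice_to_neg_natCast years cut hcut]
  rw [PySem.List.enumerate_eq_map_pyRange _ (0 : Int)]
  have hlen : PySem.List.len (years.take (years.length - cut)) = ((years.length - cut : Nat) : Int) := by
    simp [PySem.List.len]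
  rw [hlen, pvRange_sub_natCast years.length cut, List.foldl_map]
  apply PySem.List.foldl_congr_mem
  intro acc idx hidx
  rw [PySem.List.mem_pyRange_one] at hidx
  obtain ⟨k, hk, rfl⟩ : ∃ k : Nat, k < years.length - cut ∧ (k : Int) = idx :=
    ⟨idx.toNat, by omega, by omega⟩
  have hky : k < years.length := by omega
  have hyear : PySem.List.pyGetD (years.take (years.length - cut)) (k : Int) 0 = years.getD k 0 := by
    rw [PySem.List.pyGetD_natCast, List.getD_eq_getElem?_getD, List.getD_eq_getElem?_getD,
      List.getElem?_take, if_pos hk]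
  rw [hyear, PySem.List.pyGetD_natCast years k 0]
  simp only [PySem.Dict.keys]
  rw [List.foldl_map, List.foldl_map]
  apply PySem.List.foldl_congr_mem
  intro cp2 p hp
  have hgd : (pvToDict L).getD p.1 PySem.Set.empty = p.2 :=
    PySem.Dict.getD_of_mem_items _ (by simpa using hp) (pvToDict_keys_nodup L) _
  rw [hgd, PySem.List.slice_natCast_add]
  have hWnd : (List.take wsz (List.drop k years)).Nodup :=
    ((List.take_sublist _ _).trans (List.drop_sublist ..)).nodup hN
  have hpnd : (p.2 : List Int).Nodup := pvToDict_values_nodup L p hp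
  have hA : (PySem.Set.inter p.2 (PySem.Set.ofList (List.take wsz (List.drop k years)))).length
      = (List.take wsz (List.drop k years)).countP (fun y => PySem.Set.contains p.2 y) := by
    show (List.filter _ (p.2 : List Int)).length = _
    rw [← List.countP_eq_length_filter]
    rw [List.countP_congr (q := fun x => decide (x ∈ List.take wsz (List.drop k years)))
      (fun x _ => by simp [PySem.Set.mem_ofList])]
    rw [List.countP_congr (p := fun y => PySem.Set.contains p.2 y)
      (q := fun y => decide (y ∈ (p.2 : List Int))) (fun x _ => by simp)]
    exact pvCountSwap _ _ hpnd hWnd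
  have hkw : k + wsz ≤ years.length := by omega
  have hB : PySem.List.pyGetD (pvRow p.2 years) ((k : Int) + (wsz : Int)) 0
        - PySem.List.pyGetD (pvRow p.2 years) (k : Int) 0
      = (((List.take wsz (List.drop k years)).countP (fun y => PySem.Set.contains p.2 y) : Nat) : Int) := by
    have h1 : (k : Int) + (wsz : Int) = ((k + wsz : Nat) : Int) := by
      push_cast; ring
    rw [h1, PySem.List.pyGetD_natCast, PySem.List.pyGetD_natCast,
      pvRow_getD _ _ _ hkw, pvRow_getD _ _ _ (Nat.le_of_lt hky), List.take_add,
      List.countP_append]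
    push_cast
    ring
  rw [hA, hB]
  by_cases hc : thr ≤ (List.take wsz (List.drop k years)).countP (fun y => PySem.Set.contains p.2 y)
  · rw [if_pos hc, if_pos (by exact_mod_cast hc)]
    exact pvBody_eq cp2 (years.getD k 0) p.1
  · rw [if_neg hc, if_neg (by exact_mod_cast hc)]

theorem pvFoldlUpdateNodup {β : Type} (f : β → List Int) (l : List β) (s : PySem.Set Int)
    (hs : (s : List Int).Nodup) : (l.foldl (fun s x => PySem.Set.update s (f x)) s).Nodup := by
  induction l generalizing s with
  | nil => exact hs
  | cons x t ih => exact ih _ (PySem.Set.nodup_update _ _ hs)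

theorem pvMain (L : List (String × List Int)) (years : List Int) (hN : years.Nodup) :
    ((PySem.List.enumerate (PySem.List.slice years none (some (-4)))).foldl
      (fun cp iy =>
        (pvToDict L).keys.foldl
          (fun cp name =>
            if 3 ≤ (PySem.Set.inter ((pvToDict L).getD name PySem.Set.empty)
                      (PySem.Set.ofList (PySem.List.slice years (some iy.1) (some (iy.1 + 5))))).length then
              match cp.get? iy.2 with
              | some s => cp.insert iy.2 (PySem.Set.add s name)
              | none   => (cp.insert iy.2 PySem.Set.empty).insert iy.2
                            (PySem.Set.add PySem.Set.empty name)
            else cp) cp)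
      ((PySem.List.enumerate (PySem.List.slice years none (some (-2)))).foldl
        (fun cp iy =>
          (pvToDict L).keys.foldl
            (fun cp name =>
              if 2 ≤ (PySem.Set.inter ((pvToDict L).getD name PySem.Set.empty)
                        (PySem.Set.ofList (PySem.List.slice years (some iy.1) (some (iy.1 + 3))))).length then
                match cp.get? iy.2 with
                | some s => cp.insert iy.2 (PySem.Set.add s name)
                | none   => (cp.insert iy.2 PySem.Set.empty).insert iy.2
                              (PySem.Set.add PySem.Set.empty name)
              else cp) cp)
        PySem.Dict.empty)).items
    = ((PySem.List.pyRange 0 ((years.length : Int) - 4)).foldl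
      (fun cp idx =>
        ((pvToDict L).items.foldl (fun d p => d.insert p.1 (pvRow p.2 years)) PySem.Dict.empty).items.foldl
          (fun cp nr =>
            if (3 : Int) ≤ PySem.List.pyGetD nr.2 (idx + 5) 0 - PySem.List.pyGetD nr.2 idx 0 then
              PySem.Dict.modify cp (PySem.List.pyGetD years idx 0) PySem.Set.empty
                (fun s => PySem.Set.add s nr.1)
            else cp) cp)
      ((PySem.List.pyRange 0 ((years.length : Int) - 2)).foldl
        (fun cp idx =>
          ((pvToDict L).items.foldl (fun d p => d.insert p.1 (pvRow p.2 years)) PySem.Dict.empty).items.foldl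
            (fun cp nr =>
              if (2 : Int) ≤ PySem.List.pyGetD nr.2 (idx + 3) 0 - PySem.List.pyGetD nr.2 idx 0 then
                PySem.Dict.modify cp (PySem.List.pyGetD years idx 0) PySem.Set.empty
                  (fun s => PySem.Set.add s nr.1)
              else cp) cp)
        PySem.Dict.empty)).items := by
  have hcounts : ((pvToDict L).items.foldl (fun d p => d.insert p.1 (pvRow p.2 years))
        PySem.Dict.empty).items
      = (pvToDict L).items.map (fun p => (p.1, pvRow p.2 years)) := by
    rw [PySem.Dict.items_foldl_insert_fresh (pvToDict L).items (fun p => p.1)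
      (fun p => pvRow p.2 years) PySem.Dict.empty (fun a _ => by simp)
      (by simpa [PySem.Dict.keys] using pvToDict_keys_nodup L)]
    simp [PySem.Dict.empty]
  rw [hcounts]
  rw [pvPass_eq L years hN 2 3 2 rfl (by norm_num) (-2) 3 2 ((years.length : Int) - 2)
    (by norm_num) (by norm_num) (by norm_num) (by norm_num) PySem.Dict.empty]
  rw [pvPass_eq L years hN 4 5 3 rfl (by norm_num) (-4) 5 3 ((years.length : Int) - 4)
    (by norm_num) (by norm_num) (by norm_num) (by norm_num)]

theorem computeCore_py_eq (L : List (String × List Int)) :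
    computeCore_py L = computeCore_py_alt L := by
  simp only [computeCore_py, computeCore_py_alt]
  rw [PySem.Dict.values_eq_map_keys _ (pvToDict_keys_nodup L) PySem.Set.empty, List.foldl_map]
  simp only [PySem.Set.union]
  refine pvMain L _ ?_
  exact (PySem.List.sorted_perm _ _ _).symm.nodup
    (pvFoldlUpdateNodup (fun name => ((pvToDict L).getD name PySem.Set.empty : List Int))
      (pvToDict L).keys PySem.Set.empty (by simp [PySem.Set.empty]))

-- ===== VERDICT (by name: the statement is the Claim_ definition above) =====
theorem computeCore_py_spec : Claim_equal_computeCore_py := by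
  intro L _
  show computeCore_py L = computeCore_py_alt L
  exact computeCore_py_eq L
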